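-- pv_equiv track=rewrite | github.com/Althealam/Generative-Retrieval-for-Multi-Destination-Trips-via-RQ-VAE | src/preprocessing/trip_context.py | _compute_same_country_streak
-- ===== SOURCE A (Python) =====
-- def _compute_same_country_streak(countries: list[str]) -> int:
--     if not countries:
--         return 1
--     last = countries[-1]
--     streak = 1
--     for i in range(len(countries) - 2, -1, -1):
--         if countries[i] == last:
--             streak += 1
--         else:
--             break
--     return max(1, min(30, streak))
-- ===== SOURCE B (Python) =====
-- def _compute_same_country_streak(countries: list[str]) -> int:
--     if not countries:
--         return 1
--     run = 0
--     prev = None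
--     for c in countries:
--         run = run + 1 if c == prev else 1
--         prev = c
--     return max(1, min(30, run))
-- ===== Notes on version B (the rewrite author's own statement) =====
-- stated objective: alternative
-- what changed: Replaces A's backward index scan with early break (range(len-2,-1,-1) plus countries[i]==last) by a single forward fold over the elements that resets a run counter on every change of country; the trailing run length falls out without any indexing or break.
import Mathlib
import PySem

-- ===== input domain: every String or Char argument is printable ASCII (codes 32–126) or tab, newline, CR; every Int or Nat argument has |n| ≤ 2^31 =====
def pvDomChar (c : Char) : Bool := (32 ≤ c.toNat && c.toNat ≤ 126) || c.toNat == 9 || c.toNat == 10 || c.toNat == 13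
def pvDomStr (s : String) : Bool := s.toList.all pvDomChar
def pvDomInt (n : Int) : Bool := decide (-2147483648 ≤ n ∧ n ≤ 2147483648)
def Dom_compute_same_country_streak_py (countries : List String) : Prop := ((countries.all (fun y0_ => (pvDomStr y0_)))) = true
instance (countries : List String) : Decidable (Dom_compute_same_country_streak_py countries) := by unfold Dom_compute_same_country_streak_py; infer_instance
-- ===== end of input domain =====

-- B replaces A's backward index scan (with break) by a single forward fold that resets a
-- run counter whenever the country changes; same O(n) cost, different decomposition.

-- ===== PORT A =====
-- the Python 'for i in range(len(countries)-2,-1,-1): … else: break' loop, break = stop recursing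
def pvALoop (l : List String) (last : String) : List Int → Int → Int
  | [], streak => streak
  | i :: rest, streak =>
      if PySem.List.pyGetD l i "" == last then pvALoop l last rest (streak + 1) else streak

def compute_same_country_streak_py (countries : List String) : Int :=
  if countries = [] then 1
  else
    let last := PySem.List.pyGetD countries (-1) ""
    let streak := pvALoop countries last
      (PySem.List.pyRange (PySem.List.len countries - 2) (-1) (-1)) 1
    max 1 (min 30 streak)

-- ===== PORT B =====
def compute_same_country_streak_py_alt (countries : List String) : Int :=
  if countries = [] then 1
  else
    let res := countries.foldl
      (fun (s : Int × Option String) c => (if some c = s.2 then s.1 + 1 else 1, some c))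
      ((0 : Int), (none : Option String))
    max 1 (min 30 res.1)

-- ===== PRECONDITION & SPEC =====
def Spec_compute_same_country_streak_py (countries : List String) (out : Int) : Prop := out = compute_same_country_streak_py_alt countries
instance (countries : List String) (out : Int) : Decidable (Spec_compute_same_country_streak_py countries out) := by unfold Spec_compute_same_country_streak_py; infer_instance

-- ===== CLAIM (what is proved, stated in full; the proofs are below) =====
def Claim_equal_compute_same_country_streak_py : Prop := ∀ (countries : List String), Dom_compute_same_country_streak_py countries → Spec_compute_same_country_streak_py countries (compute_same_country_streak_py countries)

-- ===== LEMMAS AND PROOFS =====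

-- A's loop adds the length of the run of elements equal to `last` at the head of the scanned sequence
theorem pvALoop_eq (l : List String) (x : String) : ∀ (idxs : List Int) (s : Int),
    pvALoop l x idxs s
      = s + (((idxs.map (fun i => PySem.List.pyGetD l i "")).takeWhile (fun y => y == x)).length : Int) := by
  intro idxs
  induction idxs with
  | nil => intro s; simp [pvALoop]
  | cons i rest ih =>
      intro s
      by_cases h : PySem.List.pyGetD l i "" == x
      · simp [pvALoop, h, ih]; ring
      · simp [pvALoop, h]

-- the countdown index loop reads exactly the reversed m-prefix of l
theorem pvCountdown_map (l : List String) : ∀ (m : Nat), m ≤ l.length →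
    (PySem.List.pyRange ((m : Int) - 1) (-1) (-1)).map (fun i => PySem.List.pyGetD l i "")
      = (l.take m).reverse := by
  intro m
  induction m with
  | zero => intro _; rw [PySem.List.pyRange_neg_one_eq_nil (by norm_num)]; simp
  | succ m ih =>
      intro hm
      have hcast : ((m + 1 : Nat) : Int) - 1 = (m : Int) := by push_cast; ring
      rw [hcast, PySem.List.pyRange_neg_one_cons (by omega)]
      rw [List.map_cons, ih (by omega)]
      have hlt : m < l.length := by omega
      rw [PySem.List.pyGetD_natCast]
      have htk : List.take (m+1) l = List.take m l ++ [l[m]] := by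
        rw [List.take_add_one, List.getElem?_eq_getElem hlt]; rfl
      rw [htk, List.reverse_append]
      have hgd : l.getD m "" = l[m] := by
        simp [List.getD_eq_getElem?_getD, List.getElem?_eq_getElem hlt]
      rw [hgd]
      rfl

-- B's fold on the reversed input computes 1 + (length of the run equal to the head)
theorem pvBfold (rs : List String) : ∀ (x : String),
    List.foldr
      (fun c (s : Int × Option String) => (if some c = s.2 then s.1 + 1 else 1, some c))
      ((0 : Int), (none : Option String)) (x :: rs)
      = (1 + ((rs.takeWhile (fun y => y == x)).length : Int), some x) := by
  induction rs with
  | nil => intro x; simp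
  | cons hd t ih =>
      intro x
      rw [List.foldr_cons, ih hd]
      by_cases hx : x = hd
      · subst hx
        simp
        ring
      · have hxd : ¬ hd = x := fun h => hx (Eq.symm h)
        simp [hx, hxd]

-- ===== VERDICT (by name: the statement is the Claim_ definition above) =====
theorem compute_same_country_streak_py_spec : Claim_equal_compute_same_country_streak_py := by
  intro countries _
  unfold Spec_compute_same_country_streak_py
  by_cases h : countries = []
  · simp [compute_same_country_streak_py, compute_same_country_streak_py_alt, h]
  · obtain ⟨x, rs, hr⟩ : ∃ x rs, countries.reverse = x :: rs := by
      cases hcr : countries.reverse with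
      | nil => exact absurd (List.reverse_eq_nil_iff.mp hcr) h
      | cons a b => exact ⟨a, b, rfl⟩
    have hc : countries = rs.reverse ++ [x] := by
      have h2 := congrArg List.reverse hr
      simpa [List.reverse_cons] using h2
    subst hc
    have hne : rs.reverse ++ [x] ≠ [] := by simp
    simp only [compute_same_country_streak_py, compute_same_country_streak_py_alt, if_neg hne]
    rw [PySem.List.pyGetD_neg_one_append_singleton]
    have hlen2 : PySem.List.len (rs.reverse ++ [x]) - 2 = ((rs.length : Int)) - 1 := by
      simp [PySem.List.len_eq]
      omega
    rw [hlen2, pvALoop_eq, pvCountdown_map (rs.reverse ++ [x]) rs.length (by simp)]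
    have htake : (rs.reverse ++ [x]).take rs.length = rs.reverse := by
      have hlr : rs.length = rs.reverse.length := by simp
      rw [hlr, List.take_left]
    rw [htake, List.reverse_reverse]
    rw [← List.reverse_cons, List.foldl_reverse, pvBfold]
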